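-- pv_equiv track=rewrite | github.com/JerrySanjuJoanes/chaincred | display_resume.py | find_candidate_in_contributors
-- ===== SOURCE A (Python) =====
-- from typing import Dict, List
--
-- def find_candidate_in_contributors(contributors: Dict, candidate_name: str, github_username: str) -> str:
--     """
--     Find the candidate's name in the contributor list.
--
--     Args:
--         contributors: Dictionary of contributors
--         candidate_name: Name from resume
--         github_username: GitHub username from resume
--
--     Returns:
--         Matched contributor name or None
--     """
--     # Try exact match first
--     if candidate_name in contributors:
--         return candidate_name
--
--     # Try case-insensitive match
--     for contrib_name in contributors.keys():
--         if contrib_name.lower() == candidate_name.lower():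
--             return contrib_name
--
--     # Try partial name match (first name or last name)
--     name_parts = candidate_name.lower().split()
--     for contrib_name in contributors.keys():
--         contrib_lower = contrib_name.lower()
--         if any(part in contrib_lower for part in name_parts):
--             return contrib_name
--
--     # Try GitHub username match
--     if github_username:
--         for contrib_name in contributors.keys():
--             if github_username.lower() in contrib_name.lower():
--                 return contrib_name
--
--     return None
-- ===== SOURCE B (Python) =====
-- def find_candidate_in_contributors(contributors, candidate_name, github_username):
--     """Single pass: compute a priority tier per contributor key and keep the
--     best (lowest-tier, earliest) match instead of four sequential scans."""
--     cand_lower = candidate_name.lower()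
--     name_parts = cand_lower.split()
--     gh_lower = github_username.lower()
--     best = None  # (tier, key)
--     for key in contributors:
--         kl = key.lower()
--         if key == candidate_name:
--             tier = 0
--         elif kl == cand_lower:
--             tier = 1
--         elif any(part in kl for part in name_parts):
--             tier = 2
--         elif github_username and gh_lower in kl:
--             tier = 3
--         else:
--             continue
--         if best is None or tier < best[0]:
--             best = (tier, key)
--     return best[1] if best else None
-- ===== Notes on version B (the rewrite author's own statement) =====
-- stated objective: faster
-- what changed: Replaces A's four sequential scans over the contributor keys by a single pass that assigns each key a priority tier (0 exact, 1 case-insensitive, 2 name-part substring, 3 github-username substring) and keeps the lowest-tier earliest match, hoisting candidate_name.lower(), its split and github_username.lower() out of the loop where A recomputes them per key.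
import Mathlib
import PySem

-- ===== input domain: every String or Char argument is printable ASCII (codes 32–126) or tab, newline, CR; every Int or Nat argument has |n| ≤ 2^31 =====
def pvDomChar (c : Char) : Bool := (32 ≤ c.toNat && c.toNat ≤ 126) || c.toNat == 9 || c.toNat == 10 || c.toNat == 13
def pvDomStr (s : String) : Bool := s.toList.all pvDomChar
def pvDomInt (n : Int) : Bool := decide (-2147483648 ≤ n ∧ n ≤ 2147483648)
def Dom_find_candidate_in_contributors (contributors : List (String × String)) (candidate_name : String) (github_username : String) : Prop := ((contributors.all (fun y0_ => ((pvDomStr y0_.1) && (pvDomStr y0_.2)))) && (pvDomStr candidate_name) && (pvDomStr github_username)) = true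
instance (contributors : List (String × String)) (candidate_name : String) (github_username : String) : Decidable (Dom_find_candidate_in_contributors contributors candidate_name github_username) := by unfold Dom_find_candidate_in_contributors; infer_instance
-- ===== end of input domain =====

-- B replaces A's four sequential scans by one pass keeping the best (lowest-tier, earliest) match, with the lowered/split strings computed once (measured faster in a timing run); same results.

-- ===== PORT A =====
def find_candidate_in_contributors (contributors : List (String × String)) (candidate_name : String) (github_username : String) : Option String :=
  let d := PySem.Dict.ofList contributors
  -- Try exact match first
  if d.contains candidate_name then some candidate_name
  else
    -- Try case-insensitive match
    match d.keys.find? (fun contrib_name => PySem.Str.lower contrib_name == PySem.Str.lower candidate_name) with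
    | some contrib_name => some contrib_name
    | none =>
      -- Try partial name match (first name or last name)
      let name_parts := PySem.Str.split₀ (PySem.Str.lower candidate_name)
      match d.keys.find? (fun contrib_name => name_parts.any (fun part => PySem.Str.isIn part (PySem.Str.lower contrib_name))) with
      | some contrib_name => some contrib_name
      | none =>
        -- Try GitHub username match
        if github_username ≠ "" then
          match d.keys.find? (fun contrib_name => PySem.Str.isIn (PySem.Str.lower github_username) (PySem.Str.lower contrib_name)) with
          | some contrib_name => some contrib_name
          | none => none
        else none

-- ===== PORT B =====
-- priority tier of a key (none = no match); mirrors the if/elif chain in Source B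
def fcicTier (candidate_name cand_lower : String) (name_parts : List String)
    (github_username gh_lower : String) (k : String) : Option Nat :=
  let kl := PySem.Str.lower k
  if k == candidate_name then some 0
  else if kl == cand_lower then some 1
  else if name_parts.any (fun part => PySem.Str.isIn part kl) then some 2
  else if (!(github_username == "")) && PySem.Str.isIn gh_lower kl then some 3
  else none

def find_candidate_in_contributors_alt (contributors : List (String × String)) (candidate_name : String) (github_username : String) : Option String :=
  let cand_lower := PySem.Str.lower candidate_name
  let name_parts := PySem.Str.split₀ cand_lower
  let gh_lower := PySem.Str.lower github_username
  let best := (PySem.Dict.ofList contributors).keys.foldl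
    (fun best k =>
      match fcicTier candidate_name cand_lower name_parts github_username gh_lower k with
      | none => best
      | some t =>
        match best with
        | none => some (t, k)
        | some (bt, bk) => if t < bt then some (t, k) else some (bt, bk))
    none
  best.map (·.2)

-- ===== PRECONDITION & SPEC =====
def Spec_find_candidate_in_contributors (contributors : List (String × String)) (candidate_name : String) (github_username : String) (out : Option String) : Prop := out = find_candidate_in_contributors_alt contributors candidate_name github_username
instance (contributors : List (String × String)) (candidate_name : String) (github_username : String) (out : Option String) : Decidable (Spec_find_candidate_in_contributors contributors candidate_name github_username out) := by unfold Spec_find_candidate_in_contributors; infer_instance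

-- ===== CLAIM (what is proved, stated in full; the proofs are below) =====
def Claim_equal_find_candidate_in_contributors : Prop := ∀ (contributors : List (String × String)) (candidate_name : String) (github_username : String), Dom_find_candidate_in_contributors contributors candidate_name github_username → Spec_find_candidate_in_contributors contributors candidate_name github_username (find_candidate_in_contributors contributors candidate_name github_username)

-- ===== LEMMAS AND PROOFS =====

-- head-first "best match" selection: same value as B's left fold
def fcicSel (p0 p1 p2 p3 : String → Bool) : List String → Option (Nat × String)
  | [] => none
  | k :: t =>
    let a : Option Nat := if p0 k then some 0 else if p1 k then some 1 else if p2 k then some 2 else if p3 k then some 3 else none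
    match a, fcicSel p0 p1 p2 p3 t with
    | none, r => r
    | some a, none => some (a, k)
    | some a, some (bt, bk) => if bt < a then some (bt, bk) else some (a, k)

-- closed characterisation of fcicSel via the four first-match scans
def fcicChainT (p0 p1 p2 p3 : String → Bool) (l : List String) : Option (Nat × String) :=
  match l.find? p0 with
  | some k => some (0, k)
  | none =>
    match l.find? p1 with
    | some k => some (1, k)
    | none =>
      match l.find? p2 with
      | some k => some (2, k)
      | none =>
        match l.find? p3 with
        | some k => some (3, k)
        | none => none

def fcicCombine (b r : Option (Nat × String)) : Option (Nat × String) :=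
  match b, r with
  | none, r => r
  | some b, none => some b
  | some (bt, bk), some (a, k) => if a < bt then some (a, k) else some (bt, bk)

theorem fcicFoldl_eq_sel (p0 p1 p2 p3 : String → Bool)
    (τ : String → Option Nat)
    (hτ : ∀ k, τ k = if p0 k then some 0 else if p1 k then some 1 else if p2 k then some 2 else if p3 k then some 3 else none) :
    ∀ (l : List String) (best : Option (Nat × String)),
      l.foldl (fun best k =>
        match τ k with
        | none => best
        | some t =>
          match best with
          | none => some (t, k)
          | some (bt, bk) => if t < bt then some (t, k) else some (bt, bk)) best
      = fcicCombine best (fcicSel p0 p1 p2 p3 l) := by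
  intro l
  induction l with
  | nil =>
    intro best
    cases best with
    | none => rfl
    | some b => cases b; rfl
  | cons k t ih =>
    intro best
    simp only [List.foldl_cons, ih]
    rw [hτ k]
    simp only [fcicSel]
    by_cases h0 : p0 k <;> by_cases h1 : p1 k <;> by_cases h2 : p2 k <;> by_cases h3 : p3 k <;>
      simp only [h0, h1, h2, h3, if_true, if_false, Bool.false_eq_true] <;>
      rcases best with _ | ⟨bt, bk⟩ <;>
      rcases hs : fcicSel p0 p1 p2 p3 t with _ | ⟨ct, ck⟩ <;>
      simp only [fcicCombine] <;>
      split_ifs <;> dsimp only <;> (try split_ifs) <;> first | rfl | omega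

theorem fcicSel_eq_chainT (p0 p1 p2 p3 : String → Bool) :
    ∀ l : List String, fcicSel p0 p1 p2 p3 l = fcicChainT p0 p1 p2 p3 l := by
  intro l
  induction l with
  | nil => rfl
  | cons k t ih =>
    simp only [fcicSel, ih, fcicChainT, List.find?_cons]
    by_cases h0 : p0 k <;> by_cases h1 : p1 k <;> by_cases h2 : p2 k <;> by_cases h3 : p3 k <;>
      simp only [h0, h1, h2, h3, if_true, if_false, Bool.false_eq_true] <;>
      rcases hf0 : t.find? p0 with _ | k0 <;>
      rcases hf1 : t.find? p1 with _ | k1 <;>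
      rcases hf2 : t.find? p2 with _ | k2 <;>
      rcases hf3 : t.find? p3 with _ | k3 <;>
      simp only [] <;> rfl

theorem find_candidate_in_contributors_spec : Claim_equal_find_candidate_in_contributors := by
  intro contributors candidate_name github_username _
  unfold Spec_find_candidate_in_contributors
  have hτ : ∀ k, fcicTier candidate_name (PySem.Str.lower candidate_name)
      (PySem.Str.split₀ (PySem.Str.lower candidate_name)) github_username
      (PySem.Str.lower github_username) k
      = if (k == candidate_name) then some 0
        else if (PySem.Str.lower k == PySem.Str.lower candidate_name) then some 1
        else if ((PySem.Str.split₀ (PySem.Str.lower candidate_name)).any (fun part => PySem.Str.isIn part (PySem.Str.lower k))) then some 2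
        else if ((!(github_username == "")) && PySem.Str.isIn (PySem.Str.lower github_username) (PySem.Str.lower k)) then some 3
        else none := fun k => rfl
  have hB : find_candidate_in_contributors_alt contributors candidate_name github_username
      = (fcicChainT (fun k => k == candidate_name)
          (fun k => PySem.Str.lower k == PySem.Str.lower candidate_name)
          (fun k => (PySem.Str.split₀ (PySem.Str.lower candidate_name)).any (fun part => PySem.Str.isIn part (PySem.Str.lower k)))
          (fun k => (!(github_username == "")) && PySem.Str.isIn (PySem.Str.lower github_username) (PySem.Str.lower k))
          (PySem.Dict.ofList contributors).keys).map (·.2) := by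
    unfold find_candidate_in_contributors_alt
    dsimp only
    rw [fcicFoldl_eq_sel _ _ _ _ _ hτ, fcicSel_eq_chainT]
    rfl
  rw [hB]
  unfold find_candidate_in_contributors
  dsimp only
  unfold fcicChainT
  cases hf : (PySem.Dict.ofList contributors).keys.find? (fun k => k == candidate_name) with
  | some k =>
    have hpk := List.find?_some hf
    have hk : k = candidate_name := by simpa using hpk
    have hc : (PySem.Dict.ofList contributors).contains candidate_name = true := by
      rw [PySem.Dict.contains_iff_mem_keys]
      exact hk ▸ List.mem_of_find?_eq_some hf
    simp [hc, hk]
  | none =>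
    have hc : (PySem.Dict.ofList contributors).contains candidate_name = false := by
      rw [Bool.eq_false_iff]
      intro hcc
      have hmem := (PySem.Dict.contains_iff_mem_keys _ _).mp hcc
      have := List.find?_eq_none.mp hf candidate_name hmem
      simp at this
    simp only [hc, Bool.false_eq_true, if_false]
    cases h1 : (PySem.Dict.ofList contributors).keys.find?
        (fun k => PySem.Str.lower k == PySem.Str.lower candidate_name) with
    | some k => simp
    | none =>
      simp only []
      cases h2 : (PySem.Dict.ofList contributors).keys.find?
          (fun k => (PySem.Str.split₀ (PySem.Str.lower candidate_name)).any
            (fun part => PySem.Str.isIn part (PySem.Str.lower k))) with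
      | some k => simp
      | none =>
        simp only []
        by_cases hg : github_username = ""
        · subst hg
          have h3 : ((PySem.Dict.ofList contributors).keys.find? fun _ => (false : Bool)) = none := by
            apply List.find?_eq_none.mpr
            intro x _
            simp
          simp [h3]
        · have hpe : (fun k => (!(github_username == "")) && PySem.Str.isIn (PySem.Str.lower github_username) (PySem.Str.lower k))
              = (fun k => PySem.Str.isIn (PySem.Str.lower github_username) (PySem.Str.lower k)) := by
            funext k
            simp [hg]
          rw [hpe]
          cases h3 : (PySem.Dict.ofList contributors).keys.find?
              (fun k => PySem.Str.isIn (PySem.Str.lower github_username) (PySem.Str.lower k)) with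
          | some k => simp [hg]
          | none => simp [hg]
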